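-- pv_equiv track=rewrite | github.com/matejamateusz/OLDPLOTTING_FLASK | genericsmk.py | mkscatterplt
-- ===== SOURCE A (Python) =====
-- def mkscatterplt(time1, data1, time2, data2, interval):
--     """Creates two lists of values to be plotted in a scatter plot"""
--     """Needs time and data lists as input and the last argument is the interval of time correlation"""
--     val1 = []
--     val2 = []
--     if len(data1) == len(data2):
--         for i in range(len(data1)):
--             if (time1[i] - time2[i] > -interval) and (time1[i] - time2[i] < interval):
--                 val1.append(data1[i])
--                 val2.append(data2[i])
--     else:
--         #try zip
--         #data_zipped = zip(zip(data1, time1), zip(data2, time2))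
--
--         for i in range(len(data1)):
--             for j in range(len(data2)):
--                 if (time1[i] - time2[j] > -interval) and (time1[i] - time2[j] < interval):
--                     val1.append(data1[i])
--                     val2.append(data2[j])
--
--     return val1, val2
-- ===== SOURCE B (Python) =====
-- def _bisect_left(a, x):
--     """Leftmost insertion point for x in sorted list a (textbook bisect_left)."""
--     lo, hi = 0, len(a)
--     while lo < hi:
--         mid = (lo + hi) // 2
--         if a[mid] < x:
--             lo = mid + 1
--         else:
--             hi = mid
--     return lo
--
--
-- def _bisect_right(a, x):
--     """Rightmost insertion point for x in sorted list a (textbook bisect_right)."""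
--     lo, hi = 0, len(a)
--     while lo < hi:
--         mid = (lo + hi) // 2
--         if x < a[mid]:
--             hi = mid
--         else:
--             lo = mid + 1
--     return lo
--
--
-- def mkscatterplt(time1, data1, time2, data2, interval):
--     """Creates two lists of values to be plotted in a scatter plot"""
--     val1 = []
--     val2 = []
--     if len(data1) == len(data2):
--         for t1, t2, d1, d2 in zip(time1, time2, data1, data2):
--             if -interval < t1 - t2 < interval:
--                 val1.append(d1)
--                 val2.append(d2)
--         return val1, val2
--     # mismatched lengths: sort the second series' time points once, then
--     # binary-search the open window (t - interval, t + interval) per point of series 1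
--     pairs = sorted(((t, j) for j, (t, _) in enumerate(zip(time2, data2))),
--                    key=lambda p: p[0])
--     vals = [t for t, _ in pairs]
--     for t, d in zip(time1, data1):
--         lo = _bisect_right(vals, t - interval)
--         hi = _bisect_left(vals, t + interval)
--         for j in sorted(p[1] for p in pairs[lo:hi]):
--             val1.append(d)
--             val2.append(data2[j])
--     return val1, val2
-- ===== Notes on version B (the rewrite author's own statement) =====
-- stated objective: alternative
-- what changed: The equal-length branch becomes a single zip pass, and the mismatched-length branch replaces the nested scan by sorting the second series' (time, index) points once and binary-searching the open time window (t-interval, t+interval) per point of series 1, re-sorting each hit set by original index; Pre_ excludes only the inputs on which A raises IndexError (a time list shorter than the data list driving its index loop).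
import Mathlib
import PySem

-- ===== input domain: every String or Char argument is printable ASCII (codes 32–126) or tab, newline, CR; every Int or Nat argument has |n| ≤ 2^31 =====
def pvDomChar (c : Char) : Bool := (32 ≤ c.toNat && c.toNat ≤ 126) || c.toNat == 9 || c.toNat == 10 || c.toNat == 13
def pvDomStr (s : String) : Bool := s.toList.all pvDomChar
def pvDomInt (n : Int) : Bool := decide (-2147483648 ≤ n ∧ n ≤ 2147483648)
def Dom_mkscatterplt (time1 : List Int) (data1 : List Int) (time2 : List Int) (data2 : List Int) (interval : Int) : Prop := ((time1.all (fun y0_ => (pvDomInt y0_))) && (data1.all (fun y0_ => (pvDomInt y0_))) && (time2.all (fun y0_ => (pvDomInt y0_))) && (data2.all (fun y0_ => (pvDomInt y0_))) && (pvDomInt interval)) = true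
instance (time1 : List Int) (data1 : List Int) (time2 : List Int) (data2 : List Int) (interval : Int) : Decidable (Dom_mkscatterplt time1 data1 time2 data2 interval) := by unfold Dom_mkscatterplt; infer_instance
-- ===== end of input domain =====

-- B: the equal-length branch is one zip pass; the mismatched-length branch sorts the
-- second series' time points once and binary-searches the open time window per point
-- of series 1 instead of the nested scan; objective: alternative.

-- ===== PORT A =====
def mkscatterplt (time1 : List Int) (data1 : List Int) (time2 : List Int) (data2 : List Int) (interval : Int) : List Int × List Int :=
  let val1 : List Int := []
  let val2 : List Int := []
  if data1.length = data2.length then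
    (PySem.List.pyRange 0 (data1.length : Int) 1).foldl (fun acc i =>
      if -interval < PySem.List.pyGetD time1 i 0 - PySem.List.pyGetD time2 i 0 ∧
         PySem.List.pyGetD time1 i 0 - PySem.List.pyGetD time2 i 0 < interval then
        (acc.1 ++ [PySem.List.pyGetD data1 i 0], acc.2 ++ [PySem.List.pyGetD data2 i 0])
      else acc) (val1, val2)
  else
    (PySem.List.pyRange 0 (data1.length : Int) 1).foldl (fun acc i =>
      (PySem.List.pyRange 0 (data2.length : Int) 1).foldl (fun acc2 j =>
        if -interval < PySem.List.pyGetD time1 i 0 - PySem.List.pyGetD time2 j 0 ∧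
           PySem.List.pyGetD time1 i 0 - PySem.List.pyGetD time2 j 0 < interval then
          (acc2.1 ++ [PySem.List.pyGetD data1 i 0], acc2.2 ++ [PySem.List.pyGetD data2 j 0])
        else acc2) acc) (val1, val2)

-- ===== PORT B =====
-- _bisect_left / _bisect_right in Source B are the textbook bisect loops; ported as the
-- prelude primitives PySem.List.bisectLeft / bisectRight (same algorithm).
def mkscatterplt_alt (time1 : List Int) (data1 : List Int) (time2 : List Int) (data2 : List Int) (interval : Int) : List Int × List Int :=
  if data1.length = data2.length then
    (time1.zip (time2.zip (data1.zip data2))).foldl (fun acc q =>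
      if -interval < q.1 - q.2.1 ∧ q.1 - q.2.1 < interval then
        (acc.1 ++ [q.2.2.1], acc.2 ++ [q.2.2.2])
      else acc) ([], [])
  else
    let pairs := PySem.List.sorted
      ((PySem.List.enumerate (time2.zip data2)).map (fun q => (q.2.1, q.1)))
      (fun p => p.1) false
    let vals := pairs.map (fun p => p.1)
    (time1.zip data1).foldl (fun acc td =>
      let t := td.1
      let lo := PySem.List.bisectRight vals (t - interval)
      let hi := PySem.List.bisectLeft vals (t + interval)
      let js := PySem.List.sorted
        ((PySem.List.slice pairs (some (lo : Int)) (some (hi : Int))).map (fun p => p.2))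
        (fun j => j) false
      js.foldl (fun acc2 j =>
        (acc2.1 ++ [td.2], acc2.2 ++ [PySem.List.pyGetD data2 j 0])) acc)
      ([], [])

-- ===== PRECONDITION & SPEC =====
-- Pre_ is exactly the set of inputs on which A returns normally: A raises IndexError
-- whenever a time list is too short for the data-list-driven index loops that actually
-- run; nothing on which A returns a value is excluded.
def Pre_mkscatterplt (time1 : List Int) (data1 : List Int) (time2 : List Int) (data2 : List Int) (interval : Int) : Prop :=
  if data1.length = data2.length then
    data1 = [] ∨ (data1.length ≤ time1.length ∧ data1.length ≤ time2.length)
  else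
    data1 = [] ∨ data2 = [] ∨ (data1.length ≤ time1.length ∧ data2.length ≤ time2.length)
instance (time1 : List Int) (data1 : List Int) (time2 : List Int) (data2 : List Int) (interval : Int) : Decidable (Pre_mkscatterplt time1 data1 time2 data2 interval) := by unfold Pre_mkscatterplt; infer_instance

def pvWitness_mkscatterplt : List Int × List Int × List Int × List Int × Int := ([0, 10], [1, 2], [1], [5], 3)

def Spec_mkscatterplt (time1 : List Int) (data1 : List Int) (time2 : List Int) (data2 : List Int) (interval : Int) (out : List Int × List Int) : Prop := out = mkscatterplt_alt time1 data1 time2 data2 interval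
instance (time1 : List Int) (data1 : List Int) (time2 : List Int) (data2 : List Int) (interval : Int) (out : List Int × List Int) : Decidable (Spec_mkscatterplt time1 data1 time2 data2 interval out) := by unfold Spec_mkscatterplt; infer_instance

-- ===== CLAIM (what is proved, stated in full; the proofs are below) =====
def Claim_equal_mkscatterplt : Prop := ∀ (time1 : List Int) (data1 : List Int) (time2 : List Int) (data2 : List Int) (interval : Int), Dom_mkscatterplt time1 data1 time2 data2 interval → Pre_mkscatterplt time1 data1 time2 data2 interval → Spec_mkscatterplt time1 data1 time2 data2 interval (mkscatterplt time1 data1 time2 data2 interval)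


-- ===== LEMMAS AND PROOFS =====

-- pair-accumulator if-fold = fold over filter
theorem pairFold_filter {α : Type} (l : List α) (p : α → Prop) [DecidablePred p] (f g : α → Int) (acc : List Int × List Int) :
    l.foldl (fun a x => if p x then (a.1 ++ [f x], a.2 ++ [g x]) else a) acc
      = (l.filter (fun x => decide (p x))).foldl (fun a x => (a.1 ++ [f x], a.2 ++ [g x])) acc := by
  induction l generalizing acc with
  | nil => rfl
  | cons x xs ih =>
    by_cases h : p x <;> simp [h, ih]


theorem filter_eq_take {α : Type} (l : List α) (p : α → Bool) (k : Nat)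
    (h1 : ∀ j (hj : j < l.length), j < k → p l[j])
    (h2 : ∀ j (hj : j < l.length), k ≤ j → ¬ p l[j] = true) :
    l.filter p = l.take k := by
  induction l generalizing k with
  | nil => simp
  | cons x xs ih =>
    cases k with
    | zero =>
      have hx : ¬ p x = true := h2 0 (by simp) (by omega)
      simp only [List.take_zero]
      rw [List.filter_cons_of_neg (by simpa using hx)]
      exact ih 0 (fun j hj hlt => by omega) (fun j hj _ => h2 (j+1) (by simpa using Nat.succ_lt_succ hj) (by omega))
    | succ k =>
      have hx : p x = true := h1 0 (by simp) (by omega)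
      rw [List.filter_cons_of_pos hx, List.take_succ_cons]
      exact congrArg (x :: ·) (ih k
        (fun j hj hlt => h1 (j+1) (by simpa using Nat.succ_lt_succ hj) (by omega))
        (fun j hj hge => h2 (j+1) (by simpa using Nat.succ_lt_succ hj) (by omega)))

theorem filter_eq_drop {α : Type} (l : List α) (p : α → Bool) (k : Nat)
    (h1 : ∀ j (hj : j < l.length), j < k → ¬ p l[j] = true)
    (h2 : ∀ j (hj : j < l.length), k ≤ j → p l[j]) :
    l.filter p = l.drop k := by
  induction l generalizing k with
  | nil => simp
  | cons x xs ih =>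
    cases k with
    | zero =>
      rw [List.drop_zero]
      apply List.filter_eq_self.mpr
      intro a ha
      obtain ⟨j, hj, rfl⟩ := List.mem_iff_getElem.mp ha
      exact h2 j hj (by omega)
    | succ k =>
      have hx : ¬ p x = true := h1 0 (by simp) (by omega)
      rw [List.filter_cons_of_neg (by simpa using hx), List.drop_succ_cons]
      exact ih k
        (fun j hj hlt => h1 (j+1) (by simpa using Nat.succ_lt_succ hj) (by omega))
        (fun j hj hge => h2 (j+1) (by simpa using Nat.succ_lt_succ hj) (by omega))

theorem window_slice {α : Type} (l : List α) (key : α → Int)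
    (hs : (l.map key).Pairwise (· ≤ ·)) (lov hiv : Int) :
    PySem.List.slice l (some ((PySem.List.bisectRight (l.map key) lov : Nat) : Int))
        (some ((PySem.List.bisectLeft (l.map key) hiv : Nat) : Int))
      = l.filter (fun x => decide (lov < key x ∧ key x < hiv)) := by
  obtain ⟨hlo_le, hlo1, hlo2⟩ := PySem.List.bisectRight_spec (l.map key) lov hs
  obtain ⟨hhi_le, hhi1, hhi2⟩ := PySem.List.bisectLeft_spec (l.map key) hiv hs
  set lo := PySem.List.bisectRight (l.map key) lov with hlo
  set hi := PySem.List.bisectLeft (l.map key) hiv with hhi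
  rw [PySem.List.slice_natCast, ← List.drop_take]
  have step1 : l.filter (fun x => decide (key x < hiv)) = l.take hi := by
    apply filter_eq_take
    · intro j hj hlt
      have h := hhi1 j (by simpa using hj) hlt; rw [List.getElem_map] at h; simpa using h
    · intro j hj hge
      simp only [decide_eq_true_eq, not_lt]
      have h := hhi2 j (by simpa using hj) hge; rw [List.getElem_map] at h; simpa using h
  have step2 : (l.take hi).filter (fun x => decide (lov < key x)) = (l.take hi).drop lo := by
    apply filter_eq_drop
    · intro j hj hlt
      have hj' : j < l.length := by
        simp [List.length_take] at hj; omega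
      rw [List.getElem_take]
      simp only [decide_eq_true_eq, not_lt]
      have h := hlo1 j (by simpa using hj') hlt; rw [List.getElem_map] at h; simpa using h
    · intro j hj hge
      have hj' : j < l.length := by
        simp [List.length_take] at hj; omega
      rw [List.getElem_take]
      simp only [decide_eq_true_eq]
      have h := hlo2 j (by simpa using hj') hge; rw [List.getElem_map] at h; simpa using h
  calc List.drop lo (List.take hi l)
      = (l.filter (fun x => decide (key x < hiv))).filter (fun x => decide (lov < key x)) := by
        rw [step1, step2]
    _ = l.filter (fun x => decide (lov < key x ∧ key x < hiv)) := by
        rw [List.filter_filter]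
        apply List.filter_congr
        intro x _
        simp

theorem enumZip_eq_map_range (time2 data2 : List Int) (h2 : data2.length ≤ time2.length) :
    (PySem.List.enumerate (time2.zip data2)).map (fun q => (q.2.1, q.1))
      = (PySem.List.pyRange 0 (data2.length : Int) 1).map
          (fun j => (PySem.List.pyGetD time2 j 0, j)) := by
  have hlen : (time2.zip data2).length = data2.length := by
    simp [List.length_zip]; omega
  apply List.ext_getElem
  · simp [PySem.List.length_enumerate, PySem.List.length_pyRange_one, hlen]
  · intro k hk1 hk2
    have hk : k < data2.length := by
      simp [PySem.List.length_enumerate, hlen] at hk1; exact hk1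
    have hkt : k < time2.length := by omega
    simp only [List.getElem_map, PySem.List.getElem_enumerate, PySem.List.getElem_pyRange_one]
    have hz : (time2.zip data2)[k]'(by omega) = (time2[k]'(by omega), data2[k]) := by
      simp [List.getElem_zip]
    rw [hz]
    simp [PySem.List.pyGetD_natCast, List.getElem?_eq_getElem hkt]

theorem js_characterization (time2 data2 : List Int) (h2 : data2.length ≤ time2.length) (t interval : Int) :
    PySem.List.sorted
      ((PySem.List.slice
          (PySem.List.sorted ((PySem.List.enumerate (time2.zip data2)).map (fun q => (q.2.1, q.1))) (fun p => p.1) false)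
          (some ((PySem.List.bisectRight ((PySem.List.sorted ((PySem.List.enumerate (time2.zip data2)).map (fun q => (q.2.1, q.1))) (fun p => p.1) false).map (fun p => p.1)) (t - interval) : Nat) : Int))
          (some ((PySem.List.bisectLeft ((PySem.List.sorted ((PySem.List.enumerate (time2.zip data2)).map (fun q => (q.2.1, q.1))) (fun p => p.1) false).map (fun p => p.1)) (t + interval) : Nat) : Int))).map (fun p => p.2))
      (fun j => j) false
    = (PySem.List.pyRange 0 (data2.length : Int) 1).filter
        (fun j => decide (-interval < t - PySem.List.pyGetD time2 j 0 ∧ t - PySem.List.pyGetD time2 j 0 < interval)) := by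
  set L0 := (PySem.List.enumerate (time2.zip data2)).map (fun q => ((q.2.1 : Int), (q.1 : Int))) with hL0
  set pairs := PySem.List.sorted L0 (fun p => p.1) false with hpairs
  rw [window_slice pairs (fun p => p.1)
    (PySem.List.sorted_map_key_pairwise L0 (fun p => p.1)) (t - interval) (t + interval)]
  have hpred : (PySem.List.pyRange 0 (data2.length : Int) 1).filter
        (fun j => decide (-interval < t - PySem.List.pyGetD time2 j 0 ∧ t - PySem.List.pyGetD time2 j 0 < interval))
      = (PySem.List.pyRange 0 (data2.length : Int) 1).filter
        (fun j => decide (t - interval < PySem.List.pyGetD time2 j 0 ∧ PySem.List.pyGetD time2 j 0 < t + interval)) := by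
    apply List.filter_congr
    intro j _
    simp only [decide_eq_decide]
    omega
  rw [hpred]
  apply PySem.List.sorted_eq_of_perm_of_pairwise_lt
  · have hperm : (pairs.filter (fun p => decide (t - interval < p.1 ∧ p.1 < t + interval))).Perm
        (L0.filter (fun p => decide (t - interval < p.1 ∧ p.1 < t + interval))) :=
      (PySem.List.sorted_perm L0 (fun p => p.1) false).filter _
    have heq : (L0.filter (fun p => decide (t - interval < p.1 ∧ p.1 < t + interval))).map (fun p => p.2)
        = (PySem.List.pyRange 0 (data2.length : Int) 1).filter
            (fun j => decide (t - interval < PySem.List.pyGetD time2 j 0 ∧ PySem.List.pyGetD time2 j 0 < t + interval)) := by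
      rw [hL0, enumZip_eq_map_range time2 data2 h2, List.filter_map, List.map_map]
      have hid : ((fun p : Int × Int => p.2) ∘ fun j => (PySem.List.pyGetD time2 j 0, j)) = id := rfl
      rw [hid, List.map_id]
      rfl
    have hp2 := (hperm.map (fun p : Int × Int => p.2)).symm
    rw [heq] at hp2
    exact hp2
  · exact (PySem.List.pairwise_lt_pyRange_one 0 (data2.length : Int)).filter _

-- the equal-length zip view: the zipped quadruples are the indexed tuples
theorem quads_eq_map_range (time1 data1 time2 data2 : List Int)
    (h12 : data1.length = data2.length) (h1 : data1.length ≤ time1.length)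
    (h2 : data1.length ≤ time2.length) :
    time1.zip (time2.zip (data1.zip data2))
      = (List.range data1.length).map (fun k =>
          (time1.getD k 0, (time2.getD k 0, (data1.getD k 0, data2.getD k 0)))) := by
  apply List.ext_getElem
  · simp [List.length_zip]; omega
  · intro i hi1 hi2
    have hi : i < data1.length := by simp at hi2; exact hi2
    simp only [List.getElem_zip, List.getElem_map, List.getElem_range]
    rw [List.getD_eq_getElem _ _ (by omega), List.getD_eq_getElem _ _ (by omega),
        List.getD_eq_getElem _ _ (by omega), List.getD_eq_getElem _ _ (by omega)]

-- the mismatched-branch zip view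
theorem pairs_eq_map_range (time1 data1 : List Int) (h1 : data1.length ≤ time1.length) :
    time1.zip data1
      = (List.range data1.length).map (fun k => (time1.getD k 0, data1.getD k 0)) := by
  apply List.ext_getElem
  · simp [List.length_zip]; omega
  · intro i hi1 hi2
    have hi : i < data1.length := by simp at hi2; exact hi2
    simp only [List.getElem_zip, List.getElem_map, List.getElem_range]
    rw [List.getD_eq_getElem _ _ (by omega), List.getD_eq_getElem _ _ (by omega)]

-- ===== VERDICT (by name: the statement is the Claim_ definition above) =====
theorem mkscatterplt_spec : Claim_equal_mkscatterplt := by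
  intro time1 data1 time2 data2 interval _hdom hpre
  unfold Pre_mkscatterplt at hpre
  unfold Spec_mkscatterplt mkscatterplt mkscatterplt_alt
  by_cases hlen : data1.length = data2.length
  · rw [if_pos hlen] at hpre ⊢
    rw [if_pos hlen]
    obtain ⟨h1, h2⟩ : data1.length ≤ time1.length ∧ data1.length ≤ time2.length := by
      rcases hpre with h | h
      · simp [h]
      · exact h
    rw [quads_eq_map_range time1 data1 time2 data2 hlen h1 h2, List.foldl_map,
        PySem.List.pyRange_zero_nat, List.foldl_map]
    apply List.foldl_ext
    intro acc k _
    simp [PySem.List.pyGetD_natCast]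
  · rw [if_neg hlen] at hpre ⊢
    rw [if_neg hlen]
    rcases hpre with h1nil | h2nil | ⟨h1, h2⟩
    · -- data1 = []: both loops are empty
      subst h1nil
      simp [PySem.List.pyRange_one_eq_nil]
    · -- data2 = []: the inner loop never runs on either side
      subst h2nil
      simp [PySem.List.pyRange_one_eq_nil, PySem.List.enumerate_nil, PySem.List.sorted,
            PySem.List.slice, PySem.List.bisectLeft, PySem.List.bisectRight]
    · -- main case: both series non-trivial, every used index in range
      rw [pairs_eq_map_range time1 data1 h1, List.foldl_map,
          PySem.List.pyRange_zero_nat data1.length, List.foldl_map]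
      apply List.foldl_ext
      intro acc k _
      have hjs := js_characterization time2 data2 h2 (time1.getD k 0) interval
      simp only [PySem.List.pyGetD_natCast]
      rw [hjs, pairFold_filter]
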